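-- pv_equiv track=rewrite | github.com/CherylYul/algorithm | codility/first-and-last-digit-sum.py | solution
-- ===== SOURCE A (Python) =====
-- def solution(a):
--     hash_map = {}
--     for num in a:
--         s_num = str(num)
--         key = (s_num[0], s_num[-1])
--         if key not in hash_map:
--             hash_map[key] = [num, -1]
--         else:
--             largest, second_largest = hash_map[key]
--             if num > largest:
--                 hash_map[key] = [num, largest]
--             elif num > second_largest:
--                 hash_map[key] = [largest, num]
--     best = -1
--     for key in hash_map:
--         if hash_map[key][1] != -1:
--             best = max(hash_map[key][0] + hash_map[key][1], best)
--
--     return best if best > -1 else -1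
-- ===== SOURCE B (Python) =====
-- def solution(a):
--     groups = {}
--     for num in a:
--         s = str(num)
--         groups.setdefault((s[0], s[-1]), []).append(num)
--     best = -1
--     for v in groups.values():
--         if len(v) >= 2:
--             best = max(best, sum(sorted(v)[-2:]))
--     return best
-- ===== Notes on version B (the rewrite author's own statement) =====
-- stated objective: simpler
-- what changed: A streams a (largest, second-largest-with--1-sentinel) pair per key and post-filters on the sentinel; B just collects each key's numbers into a list and afterwards takes max(best, sum(sorted(v)[-2:])) for every group with at least two members, with best floored at -1.
import Mathlib
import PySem

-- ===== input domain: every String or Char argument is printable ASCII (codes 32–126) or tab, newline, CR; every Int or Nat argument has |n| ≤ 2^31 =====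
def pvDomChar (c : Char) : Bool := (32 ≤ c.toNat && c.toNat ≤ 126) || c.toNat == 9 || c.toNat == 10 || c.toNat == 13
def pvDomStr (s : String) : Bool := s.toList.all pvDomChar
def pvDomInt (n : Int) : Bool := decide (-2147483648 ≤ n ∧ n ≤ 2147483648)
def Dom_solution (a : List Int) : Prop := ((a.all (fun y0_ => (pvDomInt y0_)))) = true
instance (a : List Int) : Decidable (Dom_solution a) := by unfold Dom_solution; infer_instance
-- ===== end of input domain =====

-- B replaces A's streaming top-two-with-sentinel dict values by plain per-key lists reduced
-- afterwards with sorted(v)[-2:] (objective: simpler).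

-- shared helper: both Pythons compute the key (str(num)[0], str(num)[-1]);
-- str(num) is never empty, so the ' ' defaults are unreachable (ported on the List Char side)
def pvKey (num : Int) : Char × Char :=
  let s := PySem.Int.toChars num
  ((PySem.List.pyGet? s 0).getD ' ', (PySem.List.pyGet? s (-1)).getD ' ')

-- ===== PORT A =====
def pvStepA (hm : PySem.Dict (Char × Char) (Int × Int)) (num : Int) :
    PySem.Dict (Char × Char) (Int × Int) :=
  let key := pvKey num
  if hm.contains key = false then hm.insert key (num, -1)
  else
    let p := hm.getD key (0, 0)   -- largest, second_largest (key is present)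
    if num > p.1 then hm.insert key (num, p.1)
    else if num > p.2 then hm.insert key (p.1, num)
    else hm

def solution (a : List Int) : Int :=
  let hm := a.foldl pvStepA PySem.Dict.empty
  let best := hm.keys.foldl
    (fun best key =>
      if (hm.getD key (0, 0)).2 ≠ -1 then
        max ((hm.getD key (0, 0)).1 + (hm.getD key (0, 0)).2) best
      else best) (-1)
  if best > -1 then best else -1

-- ===== PORT B =====
def pvStepB (g : PySem.Dict (Char × Char) (List Int)) (num : Int) :
    PySem.Dict (Char × Char) (List Int) :=
  g.modify (pvKey num) [] (fun l => l ++ [num])   -- setdefault(key, []).append(num)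

def solution_alt (a : List Int) : Int :=
  let g := a.foldl pvStepB PySem.Dict.empty
  g.values.foldl
    (fun best v =>
      if 2 ≤ v.length then
        max best (PySem.List.slice (PySem.List.sorted v (fun x => x) false) (some (-2)) none).sum
      else best) (-1)

-- ===== PRECONDITION & SPEC =====
def Spec_solution (a : List Int) (out : Int) : Prop := out = solution_alt a
instance (a : List Int) (out : Int) : Decidable (Spec_solution a out) := by unfold Spec_solution; infer_instance

-- ===== CLAIM (what is proved, stated in full; the proofs are below) =====
def Claim_equal_solution : Prop := ∀ (a : List Int), Dom_solution a → Spec_solution a (solution a)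

-- ===== LEMMAS AND PROOFS =====

-- ---- str(num) first character: '-' exactly for negative numbers ----
theorem pvDigitChar_ne (m : Nat) : Nat.digitChar m ≠ '-' := by
  by_cases h : m < 16
  · interval_cases m <;> decide
  · have h16 : Nat.digitChar m = '*' := by
      unfold Nat.digitChar
      rw [if_neg (by omega), if_neg (by omega), if_neg (by omega), if_neg (by omega),
        if_neg (by omega), if_neg (by omega), if_neg (by omega), if_neg (by omega),
        if_neg (by omega), if_neg (by omega), if_neg (by omega), if_neg (by omega),
        if_neg (by omega), if_neg (by omega), if_neg (by omega), if_neg (by omega)]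
    rw [h16]; decide

theorem pvTdc_ne_nil (f : Nat) : ∀ (n : Nat) (ds : List Char), ds ≠ [] →
    Nat.toDigitsCore 10 f n ds ≠ [] := by
  induction f with
  | zero => intro n ds h; simpa [Nat.toDigitsCore] using h
  | succ f ih =>
    intro n ds h
    simp only [Nat.toDigitsCore]
    split
    · simp
    · exact ih _ _ (by simp)

theorem pvToDigits_ne_nil (n : Nat) : Nat.toDigits 10 n ≠ [] := by
  simp only [Nat.toDigits, Nat.toDigitsCore]
  split
  · simp
  · exact pvTdc_ne_nil _ _ _ (by simp)

theorem pvTdc_no_dash (f : Nat) : ∀ (n : Nat) (ds : List Char), (∀ c ∈ ds, c ≠ '-') →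
    ∀ c ∈ Nat.toDigitsCore 10 f n ds, c ≠ '-' := by
  induction f with
  | zero => intro n ds h; simpa [Nat.toDigitsCore] using h
  | succ f ih =>
    intro n ds h
    simp only [Nat.toDigitsCore]
    split
    · intro c hc
      rcases List.mem_cons.mp hc with h1 | h1
      · subst h1; exact pvDigitChar_ne _
      · exact h _ h1
    · refine ih _ _ ?_
      intro c hc
      rcases List.mem_cons.mp hc with h1 | h1
      · subst h1; exact pvDigitChar_ne _
      · exact h _ h1

theorem pvToDigits_no_dash (n : Nat) : ∀ c ∈ Nat.toDigits 10 n, c ≠ '-' :=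
  pvTdc_no_dash _ _ _ (by simp)

theorem pvFst_eq_dash_iff (n : Int) :
    ((PySem.List.pyGet? (PySem.Int.toChars n) 0).getD ' ' = '-') ↔ n < 0 := by
  unfold PySem.Int.toChars
  split
  · rename_i h
    simp only [PySem.List.pyGet?, PySem.List.pyIdx?]
    norm_num
    exact h
  · rename_i h
    rcases hd : Nat.toDigits 10 n.toNat with _ | ⟨c, t⟩
    · exact absurd hd (pvToDigits_ne_nil _)
    · constructor
      · intro hc
        have : (PySem.List.pyGet? (c :: t) 0).getD ' ' = c := by
          simp [PySem.List.pyGet?, PySem.List.pyIdx?]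
        rw [this] at hc
        exact absurd hc (pvToDigits_no_dash n.toNat c (by rw [hd]; exact List.mem_cons_self))
      · intro hn; omega

theorem pvKey_sign {n m : Int} (h : pvKey n = pvKey m) : n < 0 ↔ m < 0 := by
  have h1 := congrArg Prod.fst h
  simp only [pvKey] at h1
  rw [← pvFst_eq_dash_iff n, ← pvFst_eq_dash_iff m, h1]

-- ---- A's dict, observed at one key, is a fold over that key's group ----
def pvStep2 (p : Int × Int) (num : Int) : Int × Int :=
  if num > p.1 then (num, p.1) else if num > p.2 then (p.1, num) else p

def pvOStep (o : Option (Int × Int)) (num : Int) : Option (Int × Int) :=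
  match o with
  | none => some (num, -1)
  | some p => some (pvStep2 p num)

theorem pvGetA (l : List Int) : ∀ (d : PySem.Dict (Char × Char) (Int × Int)) (c : Char × Char),
    (l.foldl pvStepA d).get? c = (l.filter (fun n => pvKey n = c)).foldl pvOStep (d.get? c) := by
  induction l with
  | nil => intro d c; simp
  | cons num t ih =>
    intro d c
    simp only [List.foldl_cons, List.filter_cons]
    by_cases hk : pvKey num = c
    · simp only [hk, decide_true, if_true, List.foldl_cons]
      rw [ih]
      congr 1
      subst hk
      unfold pvStepA pvOStep
      simp only []
      rcases ho : d.get? (pvKey num) with _ | p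
      · have hc : d.contains (pvKey num) = false := by
          rw [PySem.Dict.contains_eq_isSome_get?, ho]; rfl
        simp [hc, PySem.Dict.get?_insert_self]
      · have hc : d.contains (pvKey num) = true := by
          rw [PySem.Dict.contains_eq_isSome_get?, ho]; rfl
        have hgd : d.getD (pvKey num) (0, 0) = p := PySem.Dict.getD_of_get?_eq_some _ (0, 0) ho
        simp only [hc, Bool.true_eq_false, if_false, hgd, pvStep2]
        split_ifs <;> simp [PySem.Dict.get?_insert_self, ho]
    · simp only [hk, decide_false, Bool.false_eq_true, if_false]
      rw [ih]
      congr 1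
      have hne : c ≠ pvKey num := Ne.symm hk
      unfold pvStepA
      simp only []
      split_ifs <;> first
        | rfl
        | exact PySem.Dict.get?_insert_of_ne _ _ hne

theorem pvFoldSome (l : List Int) : ∀ (p : Int × Int),
    l.foldl pvOStep (some p) = some (l.foldl pvStep2 p) := by
  induction l with
  | nil => intro p; rfl
  | cons x t ih => intro p; simp only [List.foldl_cons]; exact ih _

-- ---- keys of A's dict ----
theorem pvKeysA (l : List Int) : ∀ (d : PySem.Dict (Char × Char) (Int × Int)),
    (l.foldl pvStepA d).keys = PySem.Set.update d.keys (l.map pvKey) := by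
  induction l with
  | nil => intro d; simp [PySem.Set.update_nil]
  | cons num t ih =>
    intro d
    simp only [List.foldl_cons, List.map_cons, PySem.Set.update_cons]
    rw [ih]
    congr 1
    unfold pvStepA
    simp only []
    by_cases hc : d.contains (pvKey num)
    · have hmem : pvKey num ∈ d.keys := (PySem.Dict.contains_iff_mem_keys _ _).mp hc
      simp only [hc, Bool.true_eq_false, if_false]
      split_ifs <;>
        simp [PySem.Dict.keys_insert_of_contains _ _ hc, PySem.Set.add_of_mem hmem]
    · have hmem : pvKey num ∉ d.keys := fun h => hc ((PySem.Dict.contains_iff_mem_keys _ _).mpr h)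
      simp [hc, PySem.Dict.keys_insert_of_not_contains _ _ (by simpa using hc),
        PySem.Set.add_of_not_mem hmem]

-- ---- B's dict: group lists ----
theorem pvGetB (l : List Int) : ∀ (d : PySem.Dict (Char × Char) (List Int)) (c : Char × Char),
    (l.foldl pvStepB d).getD c [] = d.getD c [] ++ l.filter (fun n => pvKey n = c) := by
  induction l with
  | nil => intro d c; simp
  | cons num t ih =>
    intro d c
    simp only [List.foldl_cons, List.filter_cons]
    by_cases hk : pvKey num = c
    · simp only [hk, decide_true, if_true]
      rw [ih]
      unfold pvStepB
      rw [hk, PySem.Dict.getD_modify_self]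
      simp
    · simp only [hk, decide_false, Bool.false_eq_true, if_false]
      rw [ih]
      unfold pvStepB
      rw [PySem.Dict.getD_modify_of_ne _ _ _ (Ne.symm hk)]

-- ---- max-fold facts ----
theorem pvFoldl_max_le (t : List Int) : ∀ (x B : Int), x ≤ B → (∀ y ∈ t, y ≤ B) →
    t.foldl max x ≤ B := by
  induction t with
  | nil => intro x B hx _; simpa using hx
  | cons y t ih =>
    intro x B hx hy
    simp only [List.foldl_cons]
    exact ih _ _ (max_le hx (hy y List.mem_cons_self)) fun z hz => hy z (List.mem_cons_of_mem _ hz)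

-- the maximum is characterised by membership + upper bound
theorem pvMax_unique {l : List Int} {u v : Int}
    (hu1 : u ∈ l) (hu2 : ∀ y ∈ l, y ≤ u) (hv1 : v ∈ l) (hv2 : ∀ y ∈ l, y ≤ v) : u = v :=
  le_antisymm (hv2 u hu1) (hu2 v hv1)

-- ---- the streamed pair for an all-nonnegative group ----
def pvM (x : Int) (t : List Int) : Int := t.foldl max x
def pvS (x : Int) (t : List Int) : Int := ((x :: t).erase (pvM x t)).foldl max (-1)

theorem pvM_mem (x : Int) (t : List Int) : pvM x t ∈ x :: t := by
  unfold pvM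
  rcases PySem.List.foldl_max_mem t x with h | h
  · rw [h]; exact List.mem_cons_self
  · exact List.mem_cons_of_mem _ h

theorem pvM_ge (x : Int) (t : List Int) : ∀ y ∈ x :: t, y ≤ pvM x t := by
  intro y hy
  rcases List.mem_cons.mp hy with h | h
  · subst h; exact (PySem.List.le_foldl_max t y).1
  · exact (PySem.List.le_foldl_max t x).2 y h

theorem pvS_le (x : Int) (t : List Int) (hx : -1 ≤ pvM x t) : pvS x t ≤ pvM x t := by
  unfold pvS
  refine pvFoldl_max_le _ _ _ hx ?_
  intro y hy
  exact pvM_ge x t y (List.mem_of_mem_erase hy)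

theorem pvStep2_spec (seen : List Int) (x num : Int) (hx : 0 ≤ x)
    (_hseen : ∀ y ∈ seen, 0 ≤ y) (_hnum : 0 ≤ num) :
    pvStep2 (pvM x seen, pvS x seen) num = (pvM x (seen ++ [num]), pvS x (seen ++ [num])) := by
  have hM : pvM x (seen ++ [num]) = max (pvM x seen) num := by
    unfold pvM; rw [List.foldl_append]; rfl
  have hxM : x ≤ pvM x seen := pvM_ge x seen x List.mem_cons_self
  have hMnn : (0:Int) ≤ pvM x seen := le_trans hx hxM
  unfold pvStep2
  simp only []
  split_ifs with h1 h2
  · -- num > largest: new max is num, old max becomes second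
    have hnotin : num ∉ x :: seen := by
      intro hmem
      exact absurd (pvM_ge x seen num hmem) (by omega)
    have hM' : pvM x (seen ++ [num]) = num := by rw [hM]; omega
    have hS' : pvS x (seen ++ [num]) = pvM x seen := by
      unfold pvS
      rw [hM', show x :: (seen ++ [num]) = (x :: seen) ++ [num] from rfl,
        List.erase_append_right _ hnotin]
      simp only [List.erase_cons_head, List.append_nil]
      show (x :: seen).foldl max (-1) = pvM x seen
      simp only [List.foldl_cons]
      unfold pvM
      congr 1
      omega
    rw [hM', hS']
  · -- second < num ≤ largest
    have hMin : pvM x seen ∈ x :: seen := pvM_mem x seen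
    have hM' : pvM x (seen ++ [num]) = pvM x seen := by rw [hM]; omega
    have hS' : pvS x (seen ++ [num]) = num := by
      unfold pvS
      rw [hM', show x :: (seen ++ [num]) = (x :: seen) ++ [num] from rfl,
        List.erase_append_left _ hMin, List.foldl_append]
      show max (pvS x seen) num = num
      omega
    rw [hM', hS']
  · -- num ≤ second ≤ largest: unchanged
    have hSM : pvS x seen ≤ pvM x seen := pvS_le x seen (by omega)
    have hMin : pvM x seen ∈ x :: seen := pvM_mem x seen
    have hM' : pvM x (seen ++ [num]) = pvM x seen := by rw [hM]; omega
    have hS' : pvS x (seen ++ [num]) = pvS x seen := by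
      unfold pvS
      rw [hM', show x :: (seen ++ [num]) = (x :: seen) ++ [num] from rfl,
        List.erase_append_left _ hMin, List.foldl_append]
      show max (pvS x seen) num = pvS x seen
      omega
    rw [hM', hS']

theorem pvStreamNN (rest : List Int) : ∀ (seen : List Int) (x : Int), 0 ≤ x →
    (∀ y ∈ seen, 0 ≤ y) → (∀ y ∈ rest, 0 ≤ y) →
    rest.foldl pvStep2 (pvM x seen, pvS x seen) = (pvM x (seen ++ rest), pvS x (seen ++ rest)) := by
  induction rest with
  | nil => intro seen x _ _ _; simp
  | cons num t ih =>
    intro seen x hx hseen hrest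
    simp only [List.foldl_cons]
    rw [pvStep2_spec seen x num hx hseen (hrest num List.mem_cons_self),
      ih (seen ++ [num]) x hx ?_ (fun y hy => hrest y (List.mem_cons_of_mem _ hy))]
    · simp
    · intro y hy
      rcases List.mem_append.mp hy with h | h
      · exact hseen y h
      · simp only [List.mem_singleton] at h; subst h; exact hrest y List.mem_cons_self

-- base form: streaming from the first element
theorem pvStream_spec (rest : List Int) (x : Int) (hx : 0 ≤ x) (hrest : ∀ y ∈ rest, 0 ≤ y) :
    rest.foldl pvStep2 (x, -1) = (pvM x rest, pvS x rest) := by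
  have h0 : pvM x [] = x := rfl
  have h1 : pvS x [] = -1 := by unfold pvS pvM; simp
  have := pvStreamNN rest [] x hx (by simp) hrest
  rw [h0, h1] at this
  simpa using this

-- ---- negative groups keep both components ≤ -1 ----
theorem pvStreamNeg (rest : List Int) : ∀ (p : Int × Int), p.1 ≤ -1 → p.2 ≤ -1 →
    (∀ y ∈ rest, y ≤ -1) →
    (rest.foldl pvStep2 p).1 ≤ -1 ∧ (rest.foldl pvStep2 p).2 ≤ -1 := by
  induction rest with
  | nil => intro p h1 h2 _; exact ⟨h1, h2⟩
  | cons num t ih =>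
    intro p h1 h2 hall
    have hnum : num ≤ -1 := hall num List.mem_cons_self
    simp only [List.foldl_cons]
    refine ih _ ?_ ?_ (fun y hy => hall y (List.mem_cons_of_mem _ hy)) <;>
      (unfold pvStep2; split_ifs <;> (try simp) <;> omega)

-- ---- splitting a list of length ≥ 2 at its last two elements ----
theorem pvTwo (s : List Int) (h : 2 ≤ s.length) : ∃ t u w, s = t ++ [u, w] := by
  have hlen : 2 ≤ s.reverse.length := by simpa using h
  rcases hr : s.reverse with _ | ⟨w, t1⟩
  · rw [hr] at hlen; simp at hlen
  · rcases t1 with _ | ⟨u, t2⟩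
    · rw [hr] at hlen; simp at hlen
    · exact ⟨t2.reverse, u, w, by rw [← List.reverse_reverse s, hr]; simp⟩

-- ---- the one-key contribution of A's final loop equals B's ----
-- grp is one key's group (all of one sign); both loops update best the same way
theorem pvContrib (x : Int) (rest : List Int)
    (hsign : (0 ≤ x → ∀ y ∈ rest, 0 ≤ y) ∧ (x < 0 → ∀ y ∈ rest, y ≤ -1)) (b : Int)
    (hb : -1 ≤ b) :
    (if (rest.foldl pvStep2 (x, -1)).2 ≠ -1 then
        max ((rest.foldl pvStep2 (x, -1)).1 + (rest.foldl pvStep2 (x, -1)).2) b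
      else b)
    = (if 2 ≤ (x :: rest).length then
        max b (PySem.List.slice (PySem.List.sorted (x :: rest) (fun x => x) false)
          (some (-2)) none).sum
      else b) := by
  rcases List.eq_nil_or_concat rest with hnil | ⟨t0, a0, hra⟩
  · subst hnil
    simp only [List.foldl_nil, List.length_cons, List.length_nil]
    norm_num
  · -- rest ≠ []
    have hlen2 : 2 ≤ (x :: rest).length := by
      subst hra; simp
    rw [if_pos hlen2]
    -- sorted list and its last two elements
    set l := x :: rest with hl
    set s := PySem.List.sorted l (fun x => x) false with hs
    have hperm : s.Perm l := PySem.List.sorted_perm l (fun x => x) false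
    have hslen : 2 ≤ s.length := by rw [hperm.length_eq]; exact hlen2
    obtain ⟨t, u, w, hsplit⟩ := pvTwo s hslen
    have hslice : PySem.List.slice s (some (-2)) none = [u, w] := by
      rw [PySem.List.slice_from_neg_ofNat s 2 (by norm_num), hsplit]
      have : (t ++ [u, w]).length - 2 = t.length := by simp
      rw [this, List.drop_left]
    have hmem_s_l : ∀ y, y ∈ s ↔ y ∈ l := fun y => hperm.mem_iff
    by_cases hx : 0 ≤ x
    · -- all-nonnegative group: the streamed pair is exactly (max, second max) = (w, u)
      have hrest := hsign.1 hx
      have hall : ∀ y ∈ l, 0 ≤ y := by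
        intro y hy
        rcases List.mem_cons.mp hy with h | h
        · subst h; exact hx
        · exact hrest y h
      rw [pvStream_spec rest x hx hrest]
      -- pairwise order of s
      have hpw := PySem.List.sorted_pairwise l (fun x => x)
      rw [← hs, hsplit] at hpw
      rw [List.pairwise_append] at hpw
      obtain ⟨hpt, hpuw, hcross⟩ := hpw
      have huw : u ≤ w := by
        have := List.pairwise_cons.mp hpuw
        exact this.1 w (by simp)
      have ht_le : ∀ y ∈ t, y ≤ u ∧ y ≤ w := by
        intro y hy
        exact ⟨hcross y hy u (by simp), hcross y hy w (by simp)⟩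
      have hw_mem : w ∈ l := (hmem_s_l w).mp (by rw [hsplit]; simp)
      have hu_mem_s : u ∈ s := by rw [hsplit]; simp
      -- w is the maximum of l
      have hw_max : ∀ y ∈ l, y ≤ w := by
        intro y hy
        have : y ∈ s := (hmem_s_l y).mpr hy
        rw [hsplit] at this
        rcases List.mem_append.mp this with h | h
        · exact (ht_le y h).2
        · rcases List.mem_cons.mp h with h | h
          · subst h; exact huw
          · simp only [List.mem_singleton] at h; subst h; exact le_refl _
      have hMw : pvM x rest = w :=
        pvMax_unique (pvM_mem x rest) (pvM_ge x rest) hw_mem hw_max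
      -- u is the maximum of l.erase w  (erase-the-max)
      have hperm_erase : (s.erase w).Perm (l.erase w) := hperm.erase w
      have hperm_tu : (s.erase w).Perm (t ++ [u]) := by
        by_cases hwin : w ∈ t ++ [u]
        · rw [hsplit, show t ++ [u, w] = (t ++ [u]) ++ [w] by simp,
            List.erase_append_left _ hwin]
          exact (List.perm_append_singleton _ _).trans (List.perm_cons_erase hwin).symm
        · rw [hsplit, show t ++ [u, w] = (t ++ [u]) ++ [w] by simp,
            List.erase_append_right _ hwin]
          simp
      have hu_in_erase : u ∈ l.erase w := hperm_erase.mem_iff.mp (hperm_tu.symm.mem_iff.mp (by simp))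
      have hu_mem_l : u ∈ l := List.mem_of_mem_erase hu_in_erase
      have hu_nn : (0:Int) ≤ u := hall u hu_mem_l
      have hu_ub : ∀ y ∈ l.erase w, y ≤ u := by
        intro y hy
        have : y ∈ t ++ [u] := hperm_tu.mem_iff.mp (hperm_erase.mem_iff.mpr hy)
        rcases List.mem_append.mp this with h | h
        · exact (ht_le y h).1
        · simp only [List.mem_singleton] at h; omega
      have hSu : pvS x rest = u := by
        unfold pvS
        rw [show pvM x rest = w from hMw]
        refine le_antisymm ?_ ?_
        · exact pvFoldl_max_le _ _ _ (by omega) hu_ub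
        · exact (PySem.List.le_foldl_max (l.erase w) (-1)).2 u hu_in_erase
      rw [hMw, hSu, hslice]
      have : u ≠ -1 := by omega
      rw [if_pos this]
      simp only [List.sum_cons, List.sum_nil]
      omega
    · -- all-negative group: both contributions are absorbed by best ≥ -1
      have hrest := hsign.2 (by omega)
      have hxneg : x ≤ -1 := by omega
      have hres := pvStreamNeg rest (x, -1) hxneg (le_refl _) hrest
      have hall : ∀ y ∈ l, y ≤ -1 := by
        intro y hy
        rcases List.mem_cons.mp hy with h | h
        · subst h; exact hxneg
        · exact hrest y h
      have hu_mem : u ∈ l := (hmem_s_l u).mp (by rw [hsplit]; simp)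
      have hw_mem : w ∈ l := (hmem_s_l w).mp (by rw [hsplit]; simp)
      have hu := hall u hu_mem
      have hw := hall w hw_mem
      rw [hslice]
      simp only [List.sum_cons, List.sum_nil]
      split_ifs with h
      · omega
      · omega

-- ---- assembling the two final folds ----
theorem pvFoldGe (ks : List (Char × Char)) (f : Int → Char × Char → Int) :
    ∀ (b : Int), -1 ≤ b → (∀ k b', -1 ≤ b' → -1 ≤ f b' k) → -1 ≤ ks.foldl f b := by
  induction ks with
  | nil => intro b hb _; simpa using hb
  | cons k t ih =>
    intro b hb hf
    simp only [List.foldl_cons]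
    exact ih _ (hf k b hb) hf

theorem pvFoldCongr (ks : List (Char × Char)) (fA fB : Int → Char × Char → Int) :
    ∀ (b : Int), -1 ≤ b →
    (∀ k ∈ ks, ∀ b', -1 ≤ b' → fA b' k = fB b' k ∧ -1 ≤ fA b' k) →
    ks.foldl fA b = ks.foldl fB b := by
  induction ks with
  | nil => intro b _ _; rfl
  | cons k t ih =>
    intro b hb h
    simp only [List.foldl_cons]
    obtain ⟨heq, hge⟩ := h k List.mem_cons_self b hb
    rw [← heq]
    exact ih _ hge fun k' hk' => h k' (List.mem_cons_of_mem _ hk')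

-- ===== VERDICT (by name: the statement is the Claim_ definition above) =====
theorem solution_spec : Claim_equal_solution := by
  intro a _
  unfold Spec_solution solution solution_alt
  simp only []
  set hm := a.foldl pvStepA PySem.Dict.empty with hhm
  set g := a.foldl pvStepB PySem.Dict.empty with hg
  have hkeysA : hm.keys = PySem.Set.ofList (a.map pvKey) := by
    rw [hhm, pvKeysA, PySem.Dict.keys_empty, PySem.Set.update_nil_left]
  have hkeysB : g.keys = PySem.Set.ofList (a.map pvKey) := by
    rw [hg, show a.foldl pvStepB PySem.Dict.empty
        = a.foldl (fun d num => d.modify (pvKey num) [] (fun l => l ++ [num]))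
            PySem.Dict.empty from rfl,
      PySem.Dict.keys_foldl_modify_key, PySem.Dict.keys_empty, PySem.Set.update_nil_left]
  have hnodupB : g.keys.Nodup := by
    rw [hkeysB]; exact PySem.Set.nodup_ofList _
  have hvals : g.values = g.keys.map (fun k => g.getD k []) :=
    PySem.Dict.values_eq_map_keys g hnodupB []
  rw [hvals, List.foldl_map, hkeysA, hkeysB]
  set ks := PySem.Set.ofList (a.map pvKey) with hks
  set fA := fun (best : Int) (key : Char × Char) =>
    if (hm.getD key (0, 0)).2 ≠ -1 then
      max ((hm.getD key (0, 0)).1 + (hm.getD key (0, 0)).2) best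
    else best with hfA
  set fB := fun (best : Int) (k : Char × Char) =>
    if 2 ≤ (g.getD k []).length then
      max best (PySem.List.slice (PySem.List.sorted (g.getD k []) (fun x => x) false)
        (some (-2)) none).sum
    else best with hfB
  have hmain : ∀ k ∈ ks, ∀ b', (-1:Int) ≤ b' → fA b' k = fB b' k ∧ -1 ≤ fA b' k := by
    intro k hk b hb
    -- the group of k is nonempty
    have hk' : ∃ n ∈ a, pvKey n = k := by
      have := (PySem.Set.mem_ofList (xs := a.map pvKey) (y := k)).mp hk
      simpa using this
    obtain ⟨n0, hn0a, hn0k⟩ := hk'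
    have hgB : g.getD k [] = a.filter (fun n => pvKey n = k) := by
      rw [hg, pvGetB, PySem.Dict.getD_empty]
      simp
    rcases hgrp : a.filter (fun n => pvKey n = k) with _ | ⟨x, rest⟩
    · exfalso
      have : n0 ∈ a.filter (fun n => pvKey n = k) :=
        List.mem_filter.mpr ⟨hn0a, by simp [hn0k]⟩
      rw [hgrp] at this
      simp at this
    · have hgA : hm.getD k (0, 0) = rest.foldl pvStep2 (x, -1) := by
        have h1 : hm.get? k = (a.filter (fun n => pvKey n = k)).foldl pvOStep none := by
          rw [hhm, pvGetA, PySem.Dict.get?_empty]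
        rw [hgrp] at h1
        simp only [List.foldl_cons] at h1
        rw [show pvOStep none x = some (x, -1) from rfl, pvFoldSome] at h1
        exact PySem.Dict.getD_of_get?_eq_some _ (0, 0) h1
      -- all members of the group share the key k, hence the sign of x
      have hkeys : ∀ y ∈ x :: rest, pvKey y = k := by
        intro y hy
        have : y ∈ a.filter (fun n => pvKey n = k) := by rw [hgrp]; exact hy
        have := List.of_mem_filter this
        simpa using this
      have hsign : (0 ≤ x → ∀ y ∈ rest, 0 ≤ y) ∧ (x < 0 → ∀ y ∈ rest, y ≤ -1) := by
        constructor
        · intro hx y hy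
          have hiff := pvKey_sign ((hkeys y (List.mem_cons_of_mem _ hy)).trans
            (hkeys x List.mem_cons_self).symm)
          omega
        · intro hx y hy
          have hiff := pvKey_sign ((hkeys y (List.mem_cons_of_mem _ hy)).trans
            (hkeys x List.mem_cons_self).symm)
          omega
      constructor
      · rw [hfA, hfB]
        simp only [hgA, hgB, hgrp]
        exact pvContrib x rest hsign b hb
      · rw [hfA]
        simp only []
        split_ifs
        · exact le_trans hb (le_max_right _ _)
        · exact hb
  have hfolds : ks.foldl fA (-1) = ks.foldl fB (-1) :=
    pvFoldCongr ks fA fB (-1) (le_refl _) hmain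
  have hge : -1 ≤ ks.foldl fA (-1) := by
    refine pvFoldGe ks fA (-1) (le_refl _) ?_
    intro k b' hb'
    rw [hfA]
    simp only []
    split_ifs
    · exact le_trans hb' (le_max_right _ _)
    · exact hb'
  rw [← hfolds]
  split_ifs with h
  · rfl
  · omega
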